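-- pv_equiv track=rewrite | github.com/FelipeAscencio/Dynamic_Programming_Resolution | Programs/tp2.py | batallas
-- ===== SOURCE A (Python) =====
-- CARGAR = "Cargar"
--
-- ATACAR = "Atacar"
--
-- def batallas(ordas, poder): #O(n²)
--     bajas_optimas = [0] * len(ordas)
--     bajas_optimas[0] = (min(ordas[0], poder[0]))
--
--     for i in range(1, len(ordas)): #O(n)
--         bajas_optimas[i] = (min(ordas[i], poder[i]))
--         for j in range(i): #O(n)
--             bajas_optimas[i] = max(bajas_optimas[i], bajas_optimas[j] + min(ordas[i], poder[i -1-j]))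
--     estrategia = sacar_resultado(bajas_optimas, ordas, poder) #O(n²)
--     return estrategia, bajas_optimas[len(bajas_optimas) - 1]
--
-- def sacar_resultado(bajas_optimas, ordas, poder): #O(n²)
--     estrategia = [CARGAR] * len(bajas_optimas)
--     i = len(bajas_optimas) - 1
--
--     while i > 0: #O(n)
--         for j in range(i): #O(n)
--             estrategia[i] = ATACAR
--             bajas = bajas_optimas[i]
--             if bajas == bajas_optimas[j] + min(ordas[i], poder[i - 1-j]):
--                 i = j
--                 break
--         if i - 1 == j:
--             break
--         if i == 0:
--             estrategia[i] = ATACAR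
--     return estrategia
-- ===== SOURCE B (Python) =====
-- CARGAR = "Cargar"
--
-- ATACAR = "Atacar"
--
-- def batallas(ordas, poder):
--     # Same DP values, but parent pointers are recorded during the fill so the
--     # strategy is reconstructed by an O(n) walk instead of re-searching each node.
--     n = len(ordas)
--     dp = [min(ordas[0], poder[0])]
--     parent = [None]
--     for i in range(1, n):
--         base = min(ordas[i], poder[i])
--         cands = [dp[j] + min(ordas[i], poder[i - 1 - j]) for j in range(i)]
--         best = max(cands)
--         if best >= base:
--             dp.append(best)
--             parent.append(cands.index(best))
--         else:
--             dp.append(base)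
--             parent.append(None)
--     estrategia = [CARGAR] * n
--     i = n - 1
--     while i > 0:
--         estrategia[i] = ATACAR
--         p = parent[i]
--         if p is None:
--             break
--         if p == 0:
--             estrategia[0] = ATACAR
--         i = p
--     return estrategia, dp[-1]
-- ===== Notes on version B (the rewrite author's own statement) =====
-- stated objective: alternative
-- what changed: B builds the DP table by appending (list of candidates + max/index) and records a parent pointer per battle during the fill, then reconstructs the strategy with a single O(n) parent-chain walk, replacing A's preallocate-and-set fill and its while-loop that re-searches a matching predecessor at every step of the reconstruction.
import Mathlib
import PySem

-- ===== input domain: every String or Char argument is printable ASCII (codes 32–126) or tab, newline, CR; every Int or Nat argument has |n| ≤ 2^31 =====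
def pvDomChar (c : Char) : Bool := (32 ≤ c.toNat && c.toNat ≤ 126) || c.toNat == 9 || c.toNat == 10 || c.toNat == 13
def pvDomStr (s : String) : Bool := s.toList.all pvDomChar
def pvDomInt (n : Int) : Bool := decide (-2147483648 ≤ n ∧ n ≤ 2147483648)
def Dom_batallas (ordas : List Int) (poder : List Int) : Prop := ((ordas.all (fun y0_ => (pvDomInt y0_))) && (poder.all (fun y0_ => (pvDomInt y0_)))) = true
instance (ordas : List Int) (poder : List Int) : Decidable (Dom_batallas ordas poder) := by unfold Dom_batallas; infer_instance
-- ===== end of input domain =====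

-- B records parent pointers during the DP fill and reconstructs the strategy by one
-- parent-chain walk instead of A's per-step re-search of a matching predecessor.

-- ===== PORT A =====
-- inner 'for j in range(i)' of sacar_resultado: sets estrategia[i] = ATACAR on every pass
-- and breaks at the first j whose candidate equals bajas_optimas[i];
-- returns (estrategia, the new i, the last j seen)
def innerA (bajas ordas poder : List Int) (i : Int) (est : List String) : List Int → List String × Int × Int
  | [] => (est, i, 0)   -- unreachable: called only with i > 0, so range(i) is nonempty
  | j :: rest =>
    let est' := PySem.List.pySetD est i "Atacar"
    if PySem.List.pyGetD bajas i 0 == PySem.List.pyGetD bajas j 0 + min (PySem.List.pyGetD ordas i 0) (PySem.List.pyGetD poder (i - 1 - j) 0)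
    then (est', j, j)
    else match rest with
      | [] => (est', i, j)
      | _ :: _ => innerA bajas ordas poder i est' rest

-- the 'while i > 0' loop of sacar_resultado; the fuel (len(bajas)) only bounds the
-- iteration count (i strictly decreases on every pass), a pure totality guard
def whileA (bajas ordas poder : List Int) : Nat → Int → List String → List String
  | 0, _, est => est
  | fuel+1, i, est =>
    if 0 < i then
      match innerA bajas ordas poder i est (PySem.List.pyRange 0 i 1) with
      | (est', i', j) =>
        if i' - 1 == j then est'
        else whileA bajas ordas poder fuel i' (if i' == 0 then PySem.List.pySetD est' 0 "Atacar" else est')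
    else est

def sacarResultado (bajas ordas poder : List Int) : List String :=
  let est := PySem.List.pyRepeat ["Cargar"] (PySem.List.len bajas)
  whileA bajas ordas poder bajas.length (PySem.List.len bajas - 1) est

-- body of the outer 'for i in range(1, len(ordas))' loop of batallas
def stepA (ordas poder : List Int) (b : List Int) (i : Int) : List Int :=
  (PySem.List.pyRange 0 i 1).foldl (fun b j =>
      PySem.List.pySetD b i (max (PySem.List.pyGetD b i 0)
        (PySem.List.pyGetD b j 0 + min (PySem.List.pyGetD ordas i 0) (PySem.List.pyGetD poder (i - 1 - j) 0))))
    (PySem.List.pySetD b i (min (PySem.List.pyGetD ordas i 0) (PySem.List.pyGetD poder i 0)))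

def batallas (ordas poder : List Int) : List String × Int :=
  let n : Int := PySem.List.len ordas
  let b0 := PySem.List.pySetD (PySem.List.pyRepeat [(0 : Int)] n) 0
      (min (PySem.List.pyGetD ordas 0 0) (PySem.List.pyGetD poder 0 0))
  let bajas := (PySem.List.pyRange 1 n 1).foldl (stepA ordas poder) b0
  let est := sacarResultado bajas ordas poder
  (est, PySem.List.pyGetD bajas (PySem.List.len bajas - 1) 0)

-- ===== PORT B =====
-- the 'while i > 0' parent-chain walk of Source B; fuel n is again a pure totality guard
def reconB (parent : List (Option Int)) : Nat → Int → List String → List String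
  | 0, _, est => est
  | fuel+1, i, est =>
    if 0 < i then
      let est' := PySem.List.pySetD est i "Atacar"
      match PySem.List.pyGetD parent i none with
      | none => est'
      | some p => reconB parent fuel p (if p == 0 then PySem.List.pySetD est' 0 "Atacar" else est')
    else est

-- body of the 'for i in range(1, n)' loop of Source B: appends the new dp value and its parent pointer
def stepB (ordas poder : List Int) (s : List Int × List (Option Int)) (i : Int) : List Int × List (Option Int) :=
  let base := min (PySem.List.pyGetD ordas i 0) (PySem.List.pyGetD poder i 0)
  let cands := (PySem.List.pyRange 0 i 1).map (fun j =>
      PySem.List.pyGetD s.1 j 0 + min (PySem.List.pyGetD ordas i 0) (PySem.List.pyGetD poder (i - 1 - j) 0))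
  let best := (PySem.List.max? cands (fun x => x)).getD 0
  if base ≤ best then
    (s.1 ++ [best], s.2 ++ [some (((PySem.List.index? cands best).getD 0 : Nat) : Int)])
  else
    (s.1 ++ [base], s.2 ++ [none])

def batallas_alt (ordas poder : List Int) : List String × Int :=
  let n : Int := PySem.List.len ordas
  let s := (PySem.List.pyRange 1 n 1).foldl (stepB ordas poder)
    ([min (PySem.List.pyGetD ordas 0 0) (PySem.List.pyGetD poder 0 0)], ([none] : List (Option Int)))
  let est := reconB s.2 ordas.length (n - 1) (PySem.List.pyRepeat ["Cargar"] n)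
  (est, PySem.List.pyGetD s.1 (-1) 0)

-- ===== PRECONDITION & SPEC =====
-- Pre_ excludes exactly the inputs on which the Python A raises IndexError:
-- empty ordas, or poder shorter than ordas.
def Pre_batallas (ordas : List Int) (poder : List Int) : Prop :=
  ordas ≠ [] ∧ ordas.length ≤ poder.length
instance (ordas : List Int) (poder : List Int) : Decidable (Pre_batallas ordas poder) := by
  unfold Pre_batallas; infer_instance
def pvWitness_batallas : List Int × List Int := ([3, 2, 5], [2, 1, 4])

def Spec_batallas (ordas : List Int) (poder : List Int) (out : List String × Int) : Prop := out = batallas_alt ordas poder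
instance (ordas : List Int) (poder : List Int) (out : List String × Int) : Decidable (Spec_batallas ordas poder out) := by unfold Spec_batallas; infer_instance

-- ===== CLAIM (what is proved, stated in full; the proofs are below) =====
def Claim_equal_batallas : Prop := ∀ (ordas : List Int) (poder : List Int), Dom_batallas ordas poder → Pre_batallas ordas poder → Spec_batallas ordas poder (batallas ordas poder)

-- ===== LEMMAS AND PROOFS =====

-- the DP table both programs compute, one entry appended per battle
def dpStepF (o p : Nat → Int) (d : List Int) (i : Nat) : Int :=
  (List.range i).foldl (fun acc j => max acc (d.getD j 0 + min (o i) (p (i - 1 - j)))) (min (o i) (p i))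

def dpL (o p : Nat → Int) : Nat → List Int
  | 0 => []
  | i+1 => dpL o p i ++ [dpStepF o p (dpL o p i) i]

def dpOf (ordas poder : List Int) : Nat → List Int :=
  dpL (fun k => ordas.getD k 0) (fun k => poder.getD k 0)

def dvOf (ordas poder : List Int) (i : Nat) : Int := (dpOf ordas poder (i+1)).getD i 0

-- first predecessor j of battle i whose candidate attains the optimum (none if the base case wins)
def pmOf (ordas poder : List Int) (i : Nat) : Option Int :=
  ((List.range i).find? (fun j =>
    dvOf ordas poder i == dvOf ordas poder j + min (ordas.getD i 0) (poder.getD (i - 1 - j) 0))).map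
    (fun j => (j : Int))

theorem length_dpL (o p : Nat → Int) : ∀ k, (dpL o p k).length = k := by
  intro k; induction k with
  | zero => rfl
  | succ k ih => simp [dpL, ih]

theorem length_dpOf (ordas poder : List Int) (k : Nat) : (dpOf ordas poder k).length = k :=
  length_dpL _ _ k

theorem getD_append_len {α : Type} [Inhabited α] : ∀ (d : List α) (v : α) (rest : List α) (x : α),
    (d ++ v :: rest).getD d.length x = v := by
  intro d; induction d with
  | nil => intro v rest x; rfl
  | cons a d ih =>
    intro v rest x
    simp only [List.cons_append, List.length_cons, List.getD_cons_succ]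
    exact ih v rest x

theorem set_append_len {α : Type} : ∀ (d : List α) (v w : α) (rest : List α),
    (d ++ v :: rest).set d.length w = d ++ w :: rest := by
  intro d; induction d with
  | nil => intro v w rest; rfl
  | cons a d ih => intro v w rest; simp [ih]

theorem dpL_getD (o p : Nat → Int) : ∀ k j, j < k →
    (dpL o p k).getD j 0 = (dpL o p (j+1)).getD j 0 := by
  intro k; induction k with
  | zero => intro j h; omega
  | succ k ih =>
    intro j hj
    rcases Nat.lt_succ_iff_lt_or_eq.mp hj with h | h
    · have hl : j < (dpL o p k).length := by rw [length_dpL]; exact h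
      rw [dpL, List.getD_append _ _ _ _ hl]
      exact ih j h
    · subst h; rfl

theorem dpOf_getD (ordas poder : List Int) (k j : Nat) (h : j < k) :
    (dpOf ordas poder k).getD j 0 = dvOf ordas poder j := by
  unfold dpOf dvOf
  exact dpL_getD _ _ k j h

theorem dv_eq (ordas poder : List Int) (i : Nat) :
    dvOf ordas poder i = dpStepF (fun k => ordas.getD k 0) (fun k => poder.getD k 0) (dpOf ordas poder i) i := by
  unfold dvOf dpOf
  rw [dpL]
  have h := getD_append_len (dpL (fun k => ordas.getD k 0) (fun k => poder.getD k 0) i)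
    (dpStepF (fun k => ordas.getD k 0) (fun k => poder.getD k 0)
      (dpL (fun k => ordas.getD k 0) (fun k => poder.getD k 0) i) i) [] (0 : Int)
  rw [length_dpL] at h
  exact h

theorem dv_foldl (ordas poder : List Int) (i : Nat) :
    dvOf ordas poder i =
    List.foldl max (min (ordas.getD i 0) (poder.getD i 0))
      ((List.range i).map (fun j => dvOf ordas poder j + min (ordas.getD i 0) (poder.getD (i - 1 - j) 0))) := by
  rw [dv_eq]; unfold dpStepF
  rw [List.foldl_map]
  exact PySem.List.foldl_congr_mem _ _ _ _ (fun acc j hj => by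
    rw [dpOf_getD ordas poder i j (List.mem_range.mp hj)])

theorem foldl_max_init (l : List Int) : ∀ (a b : Int), List.foldl max (max a b) l = max a (List.foldl max b l) := by
  induction l with
  | nil => intro a b; rfl
  | cons c l ih =>
    intro a b
    simp only [List.foldl_cons]
    rw [max_assoc, ih]

theorem find?_congr_mem {α : Type} (l : List α) {p q : α → Bool} (h : ∀ x ∈ l, p x = q x) :
    l.find? p = l.find? q := by
  induction l with
  | nil => rfl
  | cons a l ih =>
    simp only [List.find?]
    rw [h a (by simp)]
    cases hq : q a
    · exact ih (fun x hx => h x (by simp [hx]))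
    · rfl

theorem beq_comm_int (a b : Int) : (a == b) = (b == a) := by
  rcases Decidable.em (a = b) with h | h
  · subst h; rfl
  · have h1 : (a == b) = false := beq_eq_false_iff_ne.mpr h
    have h2 : (b == a) = false := beq_eq_false_iff_ne.mpr (Ne.symm h)
    rw [h1, h2]

theorem index?_map_range : ∀ (i : Nat) (f : Nat → Int) (v : Int),
    PySem.List.index? ((List.range i).map f) v = (List.range i).find? (fun j => f j == v) := by
  intro i; induction i with
  | zero => intro f v; rfl
  | succ m ih =>
    intro f v
    rw [List.range_succ_eq_map, List.map_cons, List.map_map]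
    by_cases h : f 0 = v
    · rw [List.find?_cons_of_pos (by simp [h]), h, PySem.List.index?_cons_self]
    · rw [PySem.List.index?_cons_of_ne _ h, List.find?_cons_of_neg (by simp [h]), List.find?_map]
      have hih := ih (f ∘ Nat.succ) v
      simp only [Function.comp] at hih ⊢
      rw [hih]
      rfl

theorem pySetD_idem (l : List String) (i : Nat) (v : String) :
    PySem.List.pySetD (PySem.List.pySetD l (i : Int) v) (i : Int) v = PySem.List.pySetD l (i : Int) v := by
  simp [List.set_set]

-- the inner fill loop of A writes the running maximum into slot i and nothing else
theorem fillInnerA (ordas poder : List Int) (i : Nat) :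
    ∀ (js : List Nat) (d rest : List Int) (acc : Int), d.length = i → (∀ j ∈ js, j < i) →
    js.foldl (fun b j =>
        PySem.List.pySetD b (i : Int) (max (PySem.List.pyGetD b (i : Int) 0)
          (PySem.List.pyGetD b ((j : Nat) : Int) 0 +
            min (PySem.List.pyGetD ordas (i : Int) 0) (PySem.List.pyGetD poder ((i : Int) - 1 - (j : Int)) 0))))
      (d ++ acc :: rest)
    = d ++ (js.foldl (fun a j => max a (d.getD j 0 + min (ordas.getD i 0) (poder.getD (i - 1 - j) 0))) acc) :: rest := by
  intro js; induction js with
  | nil => intro d rest acc _ _; rfl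
  | cons j js ih =>
    intro d rest acc hd hjs
    have hj : j < i := hjs j (by simp)
    simp only [List.foldl_cons]
    have e3 : ((i : Int) - 1 - (j : Int)) = ((i - 1 - j : Nat) : Int) := by omega
    have egeti : (d ++ acc :: rest).getD i 0 = acc := by
      rw [← hd]; exact getD_append_len d acc rest 0
    have egetj : (d ++ acc :: rest).getD j 0 = d.getD j 0 :=
      List.getD_append _ _ _ _ (by omega)
    have estep : PySem.List.pySetD (d ++ acc :: rest) (i : Int)
        (max (PySem.List.pyGetD (d ++ acc :: rest) (i : Int) 0)
          (PySem.List.pyGetD (d ++ acc :: rest) ((j : Nat) : Int) 0 +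
            min (PySem.List.pyGetD ordas (i : Int) 0) (PySem.List.pyGetD poder ((i : Int) - 1 - (j : Int)) 0)))
        = d ++ (max acc (d.getD j 0 + min (ordas.getD i 0) (poder.getD (i - 1 - j) 0))) :: rest := by
      simp only [PySem.List.pySetD_natCast, e3, PySem.List.pyGetD_natCast]
      rw [egeti, egetj, ← hd]
      exact set_append_len d acc _ rest
    rw [estep]
    exact ih d rest _ hd (fun x hx => hjs x (List.mem_cons_of_mem _ hx))

-- A's outer fill loop turns the zero-padded table into the full DP table
theorem fillOuterA (ordas poder : List Int) (n : Nat) :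
    ∀ (k i : Nat), i + k = n → 1 ≤ i →
    (PySem.List.pyRange (i : Int) (n : Int) 1).foldl (stepA ordas poder)
      (dpOf ordas poder i ++ List.replicate (n - i) 0)
    = dpOf ordas poder n := by
  intro k; induction k with
  | zero =>
    intro i hik _
    have h : i = n := by omega
    subst h
    rw [PySem.List.pyRange_one_eq_nil (le_refl _)]
    simp
  | succ k ih =>
    intro i hik h1
    have hin : (i : Int) < (n : Int) := by exact_mod_cast (by omega : i < n)
    rw [PySem.List.pyRange_one_cons hin, List.foldl_cons]
    have hrep : (n - i) = (n - (i+1)) + 1 := by omega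
    have hlen : (dpOf ordas poder i).length = i := length_dpOf _ _ i
    have hstep : stepA ordas poder (dpOf ordas poder i ++ List.replicate (n - i) 0) ((i : Int))
        = dpOf ordas poder (i+1) ++ List.replicate (n - (i+1)) 0 := by
      unfold stepA
      rw [hrep, List.replicate_succ]
      have einit : PySem.List.pySetD (dpOf ordas poder i ++ (0 : Int) :: List.replicate (n - (i+1)) 0) (i : Int)
          (min (PySem.List.pyGetD ordas (i : Int) 0) (PySem.List.pyGetD poder (i : Int) 0))
          = dpOf ordas poder i ++ (min (ordas.getD i 0) (poder.getD i 0)) :: List.replicate (n - (i+1)) 0 := by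
        simp only [PySem.List.pySetD_natCast, PySem.List.pyGetD_natCast]
        have h := set_append_len (dpOf ordas poder i) (0 : Int)
          (min (ordas.getD i 0) (poder.getD i 0)) (List.replicate (n - (i+1)) 0)
        rw [hlen] at h
        exact h
      rw [einit, PySem.List.pyRange_zero_natCast, List.foldl_map]
      refine Eq.trans (fillInnerA ordas poder i (List.range i) (dpOf ordas poder i)
        (List.replicate (n - (i+1)) 0) _ hlen (fun j hj => List.mem_range.mp hj)) ?_
      have h2 : dpOf ordas poder (i+1) = dpOf ordas poder i ++
          [dpStepF (fun k => ordas.getD k 0) (fun k => poder.getD k 0) (dpOf ordas poder i) i] := rfl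
      rw [h2, List.append_assoc]
      rfl
    rw [hstep]
    have hc : ((i : Int) + 1) = (((i + 1 : Nat)) : Int) := by push_cast; ring
    rw [hc]
    exact ih (i+1) (by omega) (by omega)

-- B's fill loop computes the same DP table and the parent pointers pmOf
theorem fillOuterB (ordas poder : List Int) (n : Nat) :
    ∀ (k i : Nat), i + k = n → 1 ≤ i → ∀ (par : List (Option Int)), par.length = i →
    (∀ m, m < i → par.getD m none = pmOf ordas poder m) →
    ((PySem.List.pyRange (i : Int) (n : Int) 1).foldl (stepB ordas poder) (dpOf ordas poder i, par)).1
        = dpOf ordas poder n ∧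
    (∀ m, m < n → ((PySem.List.pyRange (i : Int) (n : Int) 1).foldl (stepB ordas poder)
        (dpOf ordas poder i, par)).2.getD m none = pmOf ordas poder m) := by
  intro k; induction k with
  | zero =>
    intro i hik _ par hlen hspec
    have h : i = n := by omega
    subst h
    rw [PySem.List.pyRange_one_eq_nil (le_refl _)]
    exact ⟨rfl, hspec⟩
  | succ k ih =>
    intro i hik h1 par hlen hspec
    obtain ⟨m0, rfl⟩ : ∃ m0, i = m0 + 1 := ⟨i - 1, by omega⟩
    have hin : ((m0+1 : Nat) : Int) < (n : Int) := by exact_mod_cast (by omega : m0+1 < n)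
    rw [PySem.List.pyRange_one_cons hin, List.foldl_cons]
    have hstep : stepB ordas poder (dpOf ordas poder (m0+1), par) (((m0+1 : Nat)) : Int)
        = (dpOf ordas poder (m0+1+1), par ++ [pmOf ordas poder (m0+1)]) := by
      simp only [stepB, PySem.List.pyGetD_natCast]
      have hcands : (PySem.List.pyRange 0 ((m0+1 : Nat) : Int) 1).map (fun j =>
            PySem.List.pyGetD (dpOf ordas poder (m0+1), par).1 j 0 +
            min (ordas.getD (m0+1) 0) (PySem.List.pyGetD poder (((m0+1 : Nat) : Int) - 1 - j) 0))
          = (List.range (m0+1)).map (fun j => dvOf ordas poder j +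
              min (ordas.getD (m0+1) 0) (poder.getD (m0+1 - 1 - j) 0)) := by
        rw [PySem.List.pyRange_zero_natCast, List.map_map]
        refine List.map_congr_left ?_
        intro j hj
        have hj' : j < m0+1 := List.mem_range.mp hj
        have e3 : (((m0+1 : Nat) : Int) - 1 - (j : Int)) = ((m0+1 - 1 - j : Nat) : Int) := by omega
        simp only [Function.comp_apply, PySem.List.pyGetD_natCast, e3]
        rw [dpOf_getD _ _ _ _ hj']
      rw [hcands]
      set g : Nat → Int := fun j => dvOf ordas poder j +
          min (ordas.getD (m0+1) 0) (poder.getD (m0+1 - 1 - j) 0) with hgdef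
      have hgapp : ∀ j, dvOf ordas poder j + min (ordas.getD (m0+1) 0) (poder.getD (m0+1 - 1 - j) 0) = g j :=
        fun j => rfl
      rw [List.range_succ_eq_map, List.map_cons]
      set t : List Int := (List.map Nat.succ (List.range m0)).map g with htdef
      rw [PySem.List.max?_id_cons]
      simp only [Option.getD_some]
      set best : Int := List.foldl max (g 0) t with hbestdef
      set base : Int := min (ordas.getD (m0+1) 0) (poder.getD (m0+1) 0) with hbasedef
      have hdv : dvOf ordas poder (m0+1) = max base best := by
        rw [dv_foldl]
        simp only [hgapp]
        rw [List.range_succ_eq_map, List.map_cons, List.foldl_cons, foldl_max_init]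
      have hboundC : ∀ x ∈ g 0 :: t, x ≤ best := by
        intro x hx
        rcases List.mem_cons.mp hx with h | h
        · subst h; exact (PySem.List.le_foldl_max t (g 0)).1
        · exact (PySem.List.le_foldl_max t (g 0)).2 x h
      split_ifs with hb
      · -- the best candidate wins (ties included): parent pointer recorded
        have hdvb : dvOf ordas poder (m0+1) = best := by rw [hdv]; exact max_eq_right hb
        have hfind : ∃ j0, (List.range (m0+1)).find? (fun j => g j == best) = some j0 := by
          have hmem : best ∈ g 0 :: t := by
            rcases PySem.List.foldl_max_mem t (g 0) with h | h
            · rw [hbestdef, h]; exact List.mem_cons_self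
            · exact List.mem_cons_of_mem _ h
          have hmem2 : best ∈ (List.range (m0+1)).map g := by
            rw [List.range_succ_eq_map, List.map_cons]; exact hmem
          obtain ⟨j, hjmem, hjg⟩ := List.mem_map.mp hmem2
          rcases hfq : (List.range (m0+1)).find? (fun j => g j == best) with _ | j0
          · exfalso
            have := List.find?_eq_none.mp hfq j hjmem
            simp [hjg] at this
          · exact ⟨j0, rfl⟩
        obtain ⟨j0, hj0⟩ := hfind
        have hidx : PySem.List.index? (g 0 :: t) best = some j0 := by
          rw [show (g 0 :: t) = (List.range (m0+1)).map g by rw [List.range_succ_eq_map, List.map_cons]]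
          rw [index?_map_range, hj0]
        have hpm : pmOf ordas poder (m0+1) = some ((j0 : Nat) : Int) := by
          unfold pmOf
          simp only [hgapp]
          rw [find?_congr_mem _ (fun x _ => by
            show (dvOf ordas poder (m0+1) == g x) = (g x == best)
            rw [hdvb, beq_comm_int])]
          rw [hj0]
          rfl
        rw [hidx, hpm]
        simp only [Option.getD_some, Prod.mk.injEq]
        constructor
        · have h2 : dpOf ordas poder (m0+1+1) = dpOf ordas poder (m0+1) ++
              [dpStepF (fun k => ordas.getD k 0) (fun k => poder.getD k 0) (dpOf ordas poder (m0+1)) (m0+1)] := rfl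
          rw [h2, ← dv_eq, hdvb]
        · trivial
      · -- the base case wins strictly: no parent pointer
        have hdvb : dvOf ordas poder (m0+1) = base := by
          rw [hdv]; exact max_eq_left (le_of_lt (lt_of_not_ge hb))
        have hpm : pmOf ordas poder (m0+1) = none := by
          unfold pmOf
          simp only [hgapp]
          have hnone : (List.range (m0+1)).find? (fun j => dvOf ordas poder (m0+1) == g j) = none := by
            rw [List.find?_eq_none]
            intro j hjmem
            have hgj : g j ≤ best := by
              apply hboundC
              rw [show (g 0 :: t) = (List.range (m0+1)).map g by rw [List.range_succ_eq_map, List.map_cons]]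
              exact List.mem_map_of_mem hjmem
            have hlt : best < base := lt_of_not_ge hb
            simp only [beq_iff_eq, hdvb]
            omega
          rw [hnone]
          rfl
        rw [hpm]
        simp only [Prod.mk.injEq]
        constructor
        · have h2 : dpOf ordas poder (m0+1+1) = dpOf ordas poder (m0+1) ++
              [dpStepF (fun k => ordas.getD k 0) (fun k => poder.getD k 0) (dpOf ordas poder (m0+1)) (m0+1)] := rfl
          rw [h2, ← dv_eq, hdvb]
        · trivial
    rw [hstep]
    have hc : (((m0+1 : Nat)) : Int) + 1 = (((m0+1+1 : Nat)) : Int) := by push_cast; ring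
    rw [hc]
    refine ih (m0+1+1) (by omega) (by omega) (par ++ [pmOf ordas poder (m0+1)]) (by simp [hlen]) ?_
    intro m hm
    rcases Nat.lt_succ_iff_lt_or_eq.mp hm with h | h
    · rw [List.getD_append _ _ _ _ (by omega)]
      exact hspec m h
    · subst h
      have h2 := getD_append_len par (pmOf ordas poder (m0+1)) ([] : List (Option Int)) none
      rw [hlen] at h2
      exact h2

-- A's inner search, run on the full range, finds the first matching predecessor
theorem innerA_run (bajas ordas poder : List Int) (i : Nat) :
    ∀ (js : List Nat) (est : List String), js ≠ [] →
    innerA bajas ordas poder (i : Int) est (js.map (fun j => ((j : Nat) : Int))) =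
      match js.find? (fun j => PySem.List.pyGetD bajas (i : Int) 0 ==
          PySem.List.pyGetD bajas ((j : Nat) : Int) 0 +
          min (PySem.List.pyGetD ordas (i : Int) 0) (PySem.List.pyGetD poder ((i : Int) - 1 - (j : Int)) 0)) with
      | some j => (PySem.List.pySetD est (i : Int) "Atacar", (j : Int), (j : Int))
      | none => (PySem.List.pySetD est (i : Int) "Atacar", (i : Int), ((js.getLast?.getD 0 : Nat) : Int)) := by
  intro js; induction js with
  | nil => intro est h; exact absurd rfl h
  | cons j js ih =>
    intro est _
    rw [List.map_cons]
    simp only [innerA, List.find?]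
    by_cases hc : (PySem.List.pyGetD bajas (i : Int) 0 ==
        PySem.List.pyGetD bajas ((j : Nat) : Int) 0 +
        min (PySem.List.pyGetD ordas (i : Int) 0) (PySem.List.pyGetD poder ((i : Int) - 1 - (j : Int)) 0)) = true
    · rw [hc]
      simp
    · rw [Bool.not_eq_true] at hc
      rw [hc]
      rw [if_neg (by simp)]
      cases js with
      | nil => rfl
      | cons j2 js2 =>
        have hih' := ih (PySem.List.pySetD est (i : Int) "Atacar") (by simp)
        rw [List.map_cons] at hih' ⊢
        rw [hih']
        rcases hf : (j2 :: js2).find? (fun j => PySem.List.pyGetD bajas (i : Int) 0 ==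
            PySem.List.pyGetD bajas ((j : Nat) : Int) 0 +
            min (PySem.List.pyGetD ordas (i : Int) 0) (PySem.List.pyGetD poder ((i : Int) - 1 - (j : Int)) 0)) with _ | j0
    
        · simp only [pySetD_idem]
          rw [List.getLast?_cons_cons]
        · simp only [pySetD_idem]

-- the two reconstruction walks agree step for step
theorem walk_eq (ordas poder : List Int) (n : Nat) (par : List (Option Int))
    (hpar : ∀ m, m < n → par.getD m none = pmOf ordas poder m) :
    ∀ (fuel : Nat) (i : Nat), i < n → ∀ est,
    whileA (dpOf ordas poder n) ordas poder fuel (i : Int) est = reconB par fuel (i : Int) est := by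
  intro fuel; induction fuel with
  | zero => intro i hi est; rfl
  | succ fuel ih =>
    intro i hi est
    by_cases h0 : i = 0
    · subst h0
      simp [whileA, reconB]
    · have hip : (0 : Int) < (i : Int) := by exact_mod_cast Nat.pos_of_ne_zero h0
      simp only [whileA, reconB, if_pos hip]
      rw [PySem.List.pyRange_zero_natCast]
      rw [innerA_run (dpOf ordas poder n) ordas poder i (List.range i) est
        (by simp [List.range_eq_nil, h0])]
      have hbr : (List.range i).find? (fun j => PySem.List.pyGetD (dpOf ordas poder n) (i : Int) 0 ==
            PySem.List.pyGetD (dpOf ordas poder n) ((j : Nat) : Int) 0 +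
            min (PySem.List.pyGetD ordas (i : Int) 0) (PySem.List.pyGetD poder ((i : Int) - 1 - (j : Int)) 0))
          = (List.range i).find? (fun j => dvOf ordas poder i ==
            dvOf ordas poder j + min (ordas.getD i 0) (poder.getD (i - 1 - j) 0)) := by
        refine find?_congr_mem _ ?_
        intro j hj
        have hj' : j < i := List.mem_range.mp hj
        have e3 : ((i : Int) - 1 - (j : Int)) = ((i - 1 - j : Nat) : Int) := by omega
        simp only [PySem.List.pyGetD_natCast, e3]
        rw [dpOf_getD _ _ n i hi, dpOf_getD _ _ n j (by omega)]
      rw [hbr]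
      rcases hf : (List.range i).find? (fun j => dvOf ordas poder i ==
          dvOf ordas poder j + min (ordas.getD i 0) (poder.getD (i - 1 - j) 0)) with _ | j0
      · -- no predecessor matches: A breaks, B stops on a none parent
        have hpmn : pmOf ordas poder i = none := by unfold pmOf; rw [hf]; rfl
        have hlast : (List.range i).getLast? = some (i - 1) := by
          obtain ⟨m0, rfl⟩ : ∃ m0, i = m0 + 1 := ⟨i - 1, by omega⟩
          simp [List.range_succ]
        simp only [hlast, Option.getD_some]
        have htrue : ((i : Int) - 1 == ((i - 1 : Nat) : Int)) = true := by
          simp only [beq_iff_eq]; omega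
        rw [if_pos htrue]
        rw [PySem.List.pyGetD_natCast]
        rw [hpar i hi, hpmn]
      · -- first matching predecessor j0: both continue at j0
        have hj0i : j0 < i := List.mem_range.mp (List.mem_of_find?_eq_some hf)
        have hpms : pmOf ordas poder i = some ((j0 : Nat) : Int) := by
          unfold pmOf; rw [hf]; rfl
        have hfalse : (((j0 : Nat) : Int) - 1 == ((j0 : Nat) : Int)) = false := by
          simp only [beq_eq_false_iff_ne]; omega
        rw [if_neg (by simp [hfalse])]
        rw [PySem.List.pyGetD_natCast]
        rw [hpar i hi, hpms]
        exact ih j0 (by omega) _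

-- ===== VERDICT (by name: the statement is the Claim_ definition above) =====
theorem batallas_spec : Claim_equal_batallas := by
  unfold Claim_equal_batallas
  intro ordas poder _ hpre
  obtain ⟨hne, _⟩ := hpre
  unfold Spec_batallas
  have hNpos : 0 < ordas.length := List.length_pos_iff.mpr hne
  obtain ⟨M, hM⟩ : ∃ M, ordas.length = M + 1 := ⟨ordas.length - 1, by omega⟩
  simp only [batallas, batallas_alt, sacarResultado, PySem.List.len_eq]
  -- A's initial table is the zero-padded one-entry DP table
  have hb0 : PySem.List.pySetD (PySem.List.pyRepeat [(0 : Int)] (ordas.length : Int)) 0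
      (min (PySem.List.pyGetD ordas 0 0) (PySem.List.pyGetD poder 0 0))
      = dpOf ordas poder 1 ++ List.replicate (ordas.length - 1) 0 := by
    rw [PySem.List.pyRepeat_singleton, PySem.List.pySetD_of_nonneg _ _ (by norm_num)]
    rw [PySem.List.pyGetD_zero, PySem.List.pyGetD_zero]
    have hd1 : dpOf ordas poder 1 = [min (ordas.getD 0 0) (poder.getD 0 0)] := rfl
    rw [hd1, hM]
    simp [List.replicate_succ]
  rw [hb0]
  have hone : (((1 : Nat)) : Int) = (1 : Int) := by norm_num
  have hbaj := fillOuterA ordas poder ordas.length (ordas.length - 1) 1 (by omega) (le_refl 1)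
  rw [hone] at hbaj
  rw [hbaj]
  -- B's fill
  have hspec0 : ∀ m, m < 1 → ([none] : List (Option Int)).getD m none = pmOf ordas poder m := by
    intro m hm
    have h : m = 0 := by omega
    subst h; rfl
  have hini : ([min (PySem.List.pyGetD ordas 0 0) (PySem.List.pyGetD poder 0 0)], ([none] : List (Option Int)))
      = (dpOf ordas poder 1, ([none] : List (Option Int))) := by
    rw [PySem.List.pyGetD_zero, PySem.List.pyGetD_zero]; rfl
  rw [hini]
  obtain ⟨hdp, hpspec⟩ := fillOuterB ordas poder ordas.length (ordas.length - 1) 1 (by omega)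
    (le_refl 1) [none] rfl hspec0
  rw [hone] at hdp hpspec
  rw [hdp]
  simp only [Prod.mk.injEq]
  have hc1 : ((ordas.length : Int) - 1) = (((ordas.length - 1 : Nat)) : Int) := by omega
  constructor
  · -- strategy component
    rw [length_dpOf, hc1]
    exact walk_eq ordas poder ordas.length _ hpspec ordas.length (ordas.length - 1) (by omega) _
  · -- optimal-value component
    have hnil : dpOf ordas poder ordas.length ≠ [] := by
      intro h
      have hl := length_dpOf ordas poder ordas.length
      rw [h] at hl
      simp at hl
      omega
    rw [length_dpOf, hc1, PySem.List.pyGetD_natCast, PySem.List.pyGetD_neg_one _ _ hnil]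
    rw [List.getLast_eq_getElem, List.getD_eq_getElem _ _ (by rw [length_dpOf]; omega)]
    congr 1
    rw [length_dpOf]
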